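-- pv_equiv track=rewrite | github.com/Liyb2002/sketch_lib | controlNet_process/vlm_pipeline/infer_components.py | _normalize_name_for_merge
-- ===== SOURCE A (Python) =====
-- def _normalize_name_for_merge(name: str) -> str:
--     """Return a merge key based on the last meaningful word."""
--     if not isinstance(name, str):
--         return ""
--
--     s = name.strip().lower()
--
--     # Remove simple punctuation and normalize whitespace
--     for ch in [",", ".", ";", ":", "!", "?", "(", ")", "[", "]", "{", "}", '"', "'"]:
--         s = s.replace(ch, " ")
--     s = " ".join(s.split())
--
--     if not s:
--         return ""
--
--     words = s.split(" ")
--     last = words[-1]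
--
--     # Optional tiny singularization: wheels -> wheel
--     if last.endswith("s") and len(last) > 3:
--         last = last[:-1]
--
--     return last
-- ===== SOURCE B (Python) =====
-- _SEPS = set(",.;:!?()[]{}\"'")
--
--
-- def _normalize_name_for_merge(name: str) -> str:
--     """Backward scan: find the last run of non-separator chars, no intermediate strings."""
--     if not isinstance(name, str):
--         return ""
--
--     def is_sep(c):
--         return c.isspace() or c in _SEPS
--
--     i = len(name) - 1
--     while i >= 0 and is_sep(name[i]):
--         i -= 1
--     if i < 0:
--         return ""
--     j = i
--     while j >= 0 and not is_sep(name[j]):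
--         j -= 1
--
--     word = name[j + 1:i + 1].lower()
--     if word.endswith("s") and len(word) > 3:
--         word = word[:-1]
--     return word
-- ===== Notes on version B (the rewrite author's own statement) =====
-- stated objective: alternative
-- what changed: A strips/lowercases the whole string, runs 14 replace passes, splits, re-joins and re-splits to take the last word; B does a single backward per-character scan from the end of the original string that skips trailing separators and collects the last non-separator run, lowercasing only that run before the same singularization.
import Mathlib
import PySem

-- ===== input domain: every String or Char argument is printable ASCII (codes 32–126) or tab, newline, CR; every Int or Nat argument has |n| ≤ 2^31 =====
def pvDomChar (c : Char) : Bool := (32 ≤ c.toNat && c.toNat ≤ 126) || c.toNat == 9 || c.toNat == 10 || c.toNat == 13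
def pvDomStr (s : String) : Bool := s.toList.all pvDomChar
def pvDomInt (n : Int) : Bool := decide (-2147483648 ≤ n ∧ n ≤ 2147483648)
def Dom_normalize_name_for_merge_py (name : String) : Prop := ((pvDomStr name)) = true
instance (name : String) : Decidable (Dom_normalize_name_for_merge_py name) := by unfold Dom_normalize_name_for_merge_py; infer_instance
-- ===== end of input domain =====

-- B replaces A's whole-string pipeline (strip/lower, 14 replace passes, split, join, re-split)
-- by a single backward scan that extracts the trailing non-separator run and lowercases only it
-- (objective: alternative decomposition; return value proved equal on all strings).

-- ===== PORT A =====
-- the 14 punctuation strings A replaces by a space, in A's order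
def pvPunct : List (List Char) :=
  [[','], ['.'], [';'], [':'], ['!'], ['?'], ['('], [')'], ['['], [']'], ['{'], ['}'], ['"'], ['\'']]

def pvACore (cs : List Char) : List Char :=
  let s0 := PySem.Chars.lower (PySem.Chars.strip cs)
  let s1 := pvPunct.foldl (fun s ch => PySem.Chars.replace s ch [' ']) s0
  let s2 := PySem.Chars.join [' '] (PySem.Chars.split₀ s1)
  if s2.isEmpty then []
  else
    let words := PySem.Chars.splitOn s2 [' ']
    let last := PySem.List.pyGetD words (-1) []
    if PySem.Chars.endswith last ['s'] && decide (last.length > 3) then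
      PySem.List.slice last none (some (-1))
    else last

def normalize_name_for_merge_py (name : String) : String :=
  String.ofList (pvACore name.toList)

-- ===== PORT B =====
-- the separator set of Source B: whitespace or one of the 14 punctuation characters
def pvSepChars : List Char := [',', '.', ';', ':', '!', '?', '(', ')', '[', ']', '{', '}', '"', '\'']
def pvIsSep (c : Char) : Bool := PySem.Chars.isspace c || decide (c ∈ pvSepChars)

def pvBCore (cs : List Char) : List Char :=
  -- the two while loops of Source B: skip trailing separators, then collect the run, scanning from the right
  let run := (cs.reverse.dropWhile pvIsSep).takeWhile (fun c => !pvIsSep c)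
  let word := PySem.Chars.lower run.reverse
  if PySem.Chars.endswith word ['s'] && decide (word.length > 3) then
    PySem.List.slice word none (some (-1))
  else word

def normalize_name_for_merge_py_alt (name : String) : String :=
  String.ofList (pvBCore name.toList)

-- ===== PRECONDITION & SPEC =====
def Spec_normalize_name_for_merge_py (name : String) (out : String) : Prop := out = normalize_name_for_merge_py_alt name
instance (name : String) (out : String) : Decidable (Spec_normalize_name_for_merge_py name out) := by unfold Spec_normalize_name_for_merge_py; infer_instance

-- ===== CLAIM (what is proved, stated in full; the proofs are below) =====
def Claim_equal_normalize_name_for_merge_py : Prop := ∀ (name : String), Dom_normalize_name_for_merge_py name → Spec_normalize_name_for_merge_py name (normalize_name_for_merge_py name)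

-- ===== LEMMAS AND PROOFS =====

def pvSubst1 (p c : Char) : Char := if c = p then ' ' else c
def pvSubst (c : Char) : Char := if c ∈ pvSepChars then ' ' else c
def pvF (c : Char) : Char := pvSubst (PySem.Chars.lowerChar c)

lemma pvReplaceGo (p : Char) : ∀ (fuel : Nat) (l acc : List Char), l.length ≤ fuel →
    PySem.Chars.replace.go [p] [' '] fuel l acc = acc.reverse ++ l.map (pvSubst1 p) := by
  intro fuel
  induction fuel with
  | zero =>
    intro l acc h
    have hl : l = [] := by cases l with | nil => rfl | cons a t => simp at h
    subst hl; rw [PySem.Chars.replace.go]; simp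
  | succ n ih =>
    intro l acc h
    cases l with
    | nil => rw [PySem.Chars.replace.go]; simp; omega
    | cons c t =>
      rw [PySem.Chars.replace.go]
      by_cases hc : p = c
      · subst hc
        simp only [List.isPrefixOf, BEq.rfl, List.isPrefixOf_nil_left, Bool.and_true, if_true,
          List.length_cons, List.length_nil, List.drop_succ_cons, List.drop_zero, List.map_cons,
          List.reverse_cons, List.reverse_nil, List.nil_append]
        rw [ih t ([' '] ++ acc) (by simp at h ⊢; omega)]
        simp [pvSubst1]
      · have hbeq : (p == c) = false := by simpa using hc
        simp only [List.isPrefixOf, hbeq, Bool.false_and, Bool.false_eq_true, if_false, List.map_cons]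
        rw [ih t (c :: acc) (by simp at h ⊢; omega)]
        simp [pvSubst1, Ne.symm hc]

lemma pvReplace_single (s : List Char) (p : Char) :
    PySem.Chars.replace s [p] [' '] = s.map (pvSubst1 p) := by
  rw [PySem.Chars.replace]
  simp only [List.isEmpty_cons, Bool.false_eq_true, if_false]
  exact pvReplaceGo p s.length s [] le_rfl


lemma pvFoldl_replace (s : List Char) :
    pvPunct.foldl (fun s ch => PySem.Chars.replace s ch [' ']) s = s.map pvSubst := by
  simp only [pvPunct, List.foldl_cons, List.foldl_nil, pvReplace_single, List.map_map]
  apply List.map_congr_left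
  intro c _
  by_cases hm : c ∈ pvSepChars
  · simp only [pvSepChars, List.mem_cons, List.not_mem_nil, or_false] at hm
    rcases hm with rfl|rfl|rfl|rfl|rfl|rfl|rfl|rfl|rfl|rfl|rfl|rfl|rfl|rfl <;> rfl
  · have h' : ¬(c = ',' ∨ c = '.' ∨ c = ';' ∨ c = ':' ∨ c = '!' ∨ c = '?' ∨ c = '(' ∨ c = ')' ∨ c = '[' ∨ c = ']' ∨ c = '{' ∨ c = '}' ∨ c = '"' ∨ c = '\'') := by
      simpa [pvSepChars] using hm
    push_neg at h'
    obtain ⟨h1,h2,h3,h4,h5,h6,h7,h8,h9,h10,h11,h12,h13,h14⟩ := h'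
    simp [Function.comp, pvSubst1, pvSubst, hm, h1,h2,h3,h4,h5,h6,h7,h8,h9,h10,h11,h12,h13,h14]

lemma pvToNat_of_mem_sep (c : Char) (h : c ∈ pvSepChars) :
    c.toNat ∈ ([44,46,59,58,33,63,40,41,91,93,123,125,34,39] : List Nat) := by
  simp only [pvSepChars, List.mem_cons, List.not_mem_nil, or_false] at h
  rcases h with rfl|rfl|rfl|rfl|rfl|rfl|rfl|rfl|rfl|rfl|rfl|rfl|rfl|rfl <;> decide

lemma pvIsspace_false_of_bounds (c : Char) (h1 : 33 ≤ c.toNat) (h2 : c.toNat ≤ 126) :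
    PySem.Chars.isspace c = false := by
  simp only [PySem.Chars.isspace]
  simp only [Bool.or_eq_false_iff, Bool.and_eq_false_iff, decide_eq_false_iff_not]
  omega

lemma pvUpper_toNat (c : Char) (hu : PySem.Chars.isupper c = true) :
    65 ≤ c.toNat ∧ c.toNat ≤ 90 := by
  simpa [PySem.Chars.isupper, Char.le_def] using hu

lemma pvLowerChar_toNat (c : Char) (hu : PySem.Chars.isupper c = true) :
    (PySem.Chars.lowerChar c).toNat = c.toNat + 32 := by
  obtain ⟨h1, h2⟩ := pvUpper_toNat c hu
  simp only [PySem.Chars.lowerChar, hu, if_true]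
  rw [Char.toNat_ofNat, if_pos]
  constructor <;> omega

lemma pvIsspace_pvF (c : Char) : PySem.Chars.isspace (pvF c) = pvIsSep c := by
  by_cases hu : PySem.Chars.isupper c = true
  · have ht := pvLowerChar_toNat c hu
    obtain ⟨h1, h2⟩ := pvUpper_toNat c hu
    have hls : PySem.Chars.lowerChar c ∈ pvSepChars → False := by
      intro hm; have := pvToNat_of_mem_sep _ hm; rw [ht] at this; simp at this; omega
    have hcs : c ∈ pvSepChars → False := by
      intro hm; have := pvToNat_of_mem_sep _ hm; simp at this; omega
    have hf : pvF c = PySem.Chars.lowerChar c := by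
      simp only [pvF, pvSubst]; rw [if_neg hls]
    rw [hf, pvIsspace_false_of_bounds _ (by omega) (by omega),
      pvIsSep, pvIsspace_false_of_bounds _ (by omega) (by omega)]
    simp only [Bool.false_or]
    exact (decide_eq_false_iff_not.2 hcs).symm
  · have hl : PySem.Chars.lowerChar c = c := by
      simp at hu; simp [PySem.Chars.lowerChar, hu]
    rw [pvF, hl, pvIsSep]
    by_cases hm : c ∈ pvSepChars
    · simp only [pvSubst]
      rw [if_pos hm]
      have h1 : PySem.Chars.isspace ' ' = true := by decide
      have := pvToNat_of_mem_sep _ hm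
      simp only [List.mem_cons, List.not_mem_nil, or_false] at this
      have h2 : PySem.Chars.isspace c = false :=
        pvIsspace_false_of_bounds _ (by omega) (by omega)
      simp [h1, h2, hm]
    · simp only [pvSubst]
      rw [if_neg hm]
      simp [hm]

lemma pvF_eq_lower (c : Char) (h : pvIsSep c = false) : pvF c = PySem.Chars.lowerChar c := by
  simp only [pvIsSep, Bool.or_eq_false_iff, decide_eq_false_iff_not] at h
  by_cases hu : PySem.Chars.isupper c = true
  · have ht := pvLowerChar_toNat c hu
    obtain ⟨h1, h2⟩ := pvUpper_toNat c hu
    have hls : PySem.Chars.lowerChar c ∈ pvSepChars → False := by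
      intro hm; have := pvToNat_of_mem_sep _ hm; rw [ht] at this; simp at this; omega
    simp only [pvF, pvSubst]; rw [if_neg hls]
  · have hl : PySem.Chars.lowerChar c = c := by
      simp at hu; simp [PySem.Chars.lowerChar, hu]
    simp only [pvF, hl, pvSubst]
    rw [if_neg h.2]

def pvLastRun (p : Char → Bool) (l : List Char) : List Char :=
  ((l.reverse.dropWhile p).takeWhile (fun c => !p c)).reverse

lemma pvDropWhile_dropWhile {p q : Char → Bool} (hpq : ∀ c, q c = true → p c = true) :
    ∀ l : List Char, (l.dropWhile q).dropWhile p = l.dropWhile p := by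
  intro l
  induction l with
  | nil => rfl
  | cons c t ih =>
    by_cases hq : q c = true
    · rw [List.dropWhile_cons_of_pos hq, List.dropWhile_cons_of_pos (hpq c hq), ih]
    · rw [List.dropWhile_cons_of_neg (by simp [hq])]

lemma pvLastRun_prefix {p : Char → Bool} {a x : List Char} (h : ∀ c ∈ a, p c = true) :
    pvLastRun p (a ++ x) = pvLastRun p x := by
  unfold pvLastRun
  rw [List.reverse_append, List.dropWhile_append]
  by_cases hx : (x.reverse.dropWhile p).isEmpty = true
  · rw [if_pos hx]
    have h1 : a.reverse.dropWhile p = [] :=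
      List.dropWhile_eq_nil_iff.mpr (by intro c hc; exact h c (List.mem_reverse.mp hc))
    have h2 : x.reverse.dropWhile p = [] := by simpa using hx
    rw [h1, h2]
  · rw [if_neg hx, List.takeWhile_append]
    have hs : ∃ s, s ∈ x.reverse.dropWhile p ∧ p s = false := by
      cases hd : x.reverse.dropWhile p with
      | nil => simp [hd] at hx
      | cons s t => exact ⟨s, by simp [hd], by
          have := List.head_dropWhile_not p (l := x.reverse) (by simp [hd])
          simpa [hd] using this⟩
    by_cases hlen : ((x.reverse.dropWhile p).takeWhile (fun c => !p c)).length = (x.reverse.dropWhile p).length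
    · rw [if_pos hlen]
      have heq : (x.reverse.dropWhile p).takeWhile (fun c => !p c) = x.reverse.dropWhile p :=
        (List.takeWhile_prefix _).eq_of_length hlen
      have h3 : a.reverse.takeWhile (fun c => !p c) = [] := by
        rw [List.takeWhile_eq_nil_iff]
        intro hl
        simp only [Bool.not_eq_true', Bool.not_eq_false]
        exact h _ (List.mem_reverse.mp (List.get_mem _ _))
      rw [h3, heq, List.append_nil]
    · rw [if_neg hlen]

lemma pvLastRun_suffix {p : Char → Bool} {l b : List Char} (h : ∀ c ∈ b, p c = true) :
    pvLastRun p (l ++ b) = pvLastRun p l := by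
  unfold pvLastRun
  have hb : b.reverse.dropWhile p = [] :=
    List.dropWhile_eq_nil_iff.mpr (fun c hc => h c (List.mem_reverse.mp hc))
  rw [List.reverse_append, List.dropWhile_append, if_pos (by simp [hb])]

lemma pvLastRun_append {p : Char → Bool} (a : List Char) (s₀ : Char) (r' : List Char)
    (h₀ : p s₀ = true) (hr : ∃ c ∈ s₀ :: r', p c = false) :
    pvLastRun p (a ++ s₀ :: r') = pvLastRun p (s₀ :: r') := by
  unfold pvLastRun
  rw [List.reverse_append, List.dropWhile_append]
  have hne : (s₀ :: r').reverse.dropWhile p ≠ [] := by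
    rw [Ne, List.dropWhile_eq_nil_iff]
    intro hall
    obtain ⟨c, hc, hcf⟩ := hr
    exact absurd (hall c (List.mem_reverse.mpr hc)) (by simp [hcf])
  rw [if_neg (by simpa using hne), List.takeWhile_append]
  have hmem : s₀ ∈ (s₀ :: r').reverse.dropWhile p := by
    have hsuf : (s₀ :: r').reverse.dropWhile p <:+ (s₀ :: r').reverse := List.dropWhile_suffix p
    -- s₀ is the last element of the reversed list; any nonempty suffix contains it
    obtain ⟨u, hu⟩ := hsuf
    have hlast : ((s₀ :: r').reverse.dropWhile p).getLast hne ∈ (s₀ :: r').reverse.dropWhile p :=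
      List.getLast_mem hne
    have hg : ((s₀ :: r').reverse.dropWhile p).getLast hne = s₀ := by
      have h1 : (u ++ (s₀ :: r').reverse.dropWhile p).getLast
          (by intro hh; exact hne (by simpa using (List.append_eq_nil_iff.mp hh).2)) =
          ((s₀ :: r').reverse.dropWhile p).getLast hne :=
        List.getLast_append_of_ne_nil _ hne
      rw [← h1]
      have h2 : (s₀ :: r').reverse.getLast (by simp) = s₀ := by
        rw [List.getLast_reverse]
        rfl
      calc (u ++ (s₀ :: r').reverse.dropWhile p).getLast _
          = (s₀ :: r').reverse.getLast (by simp) := by congr 1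
        _ = s₀ := h2
    rwa [hg] at hlast
  have hlen : ¬(((s₀ :: r').reverse.dropWhile p).takeWhile (fun c => !p c)).length =
      ((s₀ :: r').reverse.dropWhile p).length := by
    intro hlen
    have heq := (List.takeWhile_prefix (l := (s₀ :: r').reverse.dropWhile p)
      (p := fun c => !p c)).eq_of_length hlen
    have := List.mem_takeWhile_imp (heq ▸ hmem)
    simp [h₀] at this
  rw [if_neg hlen]

lemma pvLastRun_map {p : Char → Bool} {f : Char → Char} (l : List Char) :
    pvLastRun p (l.map f) = (pvLastRun (fun c => p (f c)) l).map f := by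
  unfold pvLastRun
  rw [← List.map_reverse, List.dropWhile_map, List.takeWhile_map, ← List.map_reverse]
  rfl

-- split₀.go: accumulator normalization and word-run characterization
lemma pvSplitGo_acc : ∀ (l cur : List Char) (acc : List (List Char)),
    PySem.Chars.split₀.go l cur acc = acc.reverse ++ PySem.Chars.split₀.go l cur [] := by
  intro l
  induction l with
  | nil =>
    intro cur acc
    rw [PySem.Chars.split₀.go, PySem.Chars.split₀.go]
    by_cases hc : cur.isEmpty = true <;> simp [hc]
  | cons c t ih =>
    intro cur acc
    rw [PySem.Chars.split₀.go, PySem.Chars.split₀.go]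
    by_cases hs : PySem.Chars.isspace c = true
    · by_cases hc : cur.isEmpty = true
      · simp only [hs, hc, if_true]
        rw [ih [] acc]
      · simp only [hs, hc, if_true, Bool.false_eq_true, if_false]
        rw [ih [] (cur.reverse :: acc), ih [] [cur.reverse]]
        simp
    · simp only [hs, Bool.false_eq_true, if_false]
      exact ih (c :: cur) acc

lemma pvSplitGo_run : ∀ (l cur : List Char), cur ≠ [] →
    PySem.Chars.split₀.go l cur [] =
      (cur.reverse ++ l.takeWhile (fun c => !PySem.Chars.isspace c)) ::
        PySem.Chars.split₀.go (l.dropWhile (fun c => !PySem.Chars.isspace c)) [] [] := by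
  intro l
  induction l with
  | nil =>
    intro cur hcur
    rw [PySem.Chars.split₀.go]
    simp [List.isEmpty_eq_false_iff.mpr hcur, hcur]
    rw [PySem.Chars.split₀.go]
    rfl
  | cons c t ih =>
    intro cur hcur
    by_cases hs : PySem.Chars.isspace c = true
    · rw [PySem.Chars.split₀.go]
      simp only [hs, if_true, List.isEmpty_eq_false_iff.mpr hcur, Bool.false_eq_true, if_false]
      rw [pvSplitGo_acc]
      rw [List.takeWhile_cons_of_neg (by simp [hs]), List.dropWhile_cons_of_neg (by simp [hs])]
      simp only [List.append_nil, List.cons.injEq, true_and]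
      conv_rhs => rw [PySem.Chars.split₀.go]
      simp [hs]
    · rw [PySem.Chars.split₀.go]
      simp only [hs, Bool.false_eq_true, if_false]
      rw [ih (c :: cur) (by simp)]
      rw [List.takeWhile_cons_of_pos (by simp [hs]), List.dropWhile_cons_of_pos (by simp [hs])]
      simp

lemma pvSplit_nil : PySem.Chars.split₀ [] = [] := by rfl

lemma pvSplit_space {c : Char} (t : List Char) (hs : PySem.Chars.isspace c = true) :
    PySem.Chars.split₀ (c :: t) = PySem.Chars.split₀ t := by
  rw [PySem.Chars.split₀, PySem.Chars.split₀, PySem.Chars.split₀.go]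
  simp [hs]

lemma pvSplit_nonspace {c : Char} (t : List Char) (hs : PySem.Chars.isspace c = false) :
    PySem.Chars.split₀ (c :: t) =
      (c :: t.takeWhile (fun c => !PySem.Chars.isspace c)) ::
        PySem.Chars.split₀ (t.dropWhile (fun c => !PySem.Chars.isspace c)) := by
  rw [PySem.Chars.split₀, PySem.Chars.split₀.go]
  simp only [hs, Bool.false_eq_true, if_false]
  rw [pvSplitGo_run t [c] (by simp)]
  rw [PySem.Chars.split₀]
  simp

-- every word of split₀ is nonempty and space-free
lemma pvW1 : ∀ (n : Nat) (u : List Char), u.length ≤ n →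
    ∀ w ∈ PySem.Chars.split₀ u, w ≠ [] ∧ ∀ c ∈ w, PySem.Chars.isspace c = false := by
  intro n
  induction n with
  | zero =>
    intro u h w hw
    have : u = [] := by cases u with | nil => rfl | cons a t => simp at h
    subst this; simp [pvSplit_nil] at hw
  | succ n ih =>
    intro u h w hw
    cases u with
    | nil => simp [pvSplit_nil] at hw
    | cons c t =>
      by_cases hs : PySem.Chars.isspace c = true
      · rw [pvSplit_space t hs] at hw
        exact ih t (by simp at h; omega) w hw
      · rw [pvSplit_nonspace t (by simpa using hs)] at hw
        rw [List.mem_cons] at hw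
        rcases hw with rfl | hw
        · refine ⟨by simp, ?_⟩
          intro d hd
          rw [List.mem_cons] at hd
          rcases hd with rfl | hd
          · simpa using hs
          · simpa using List.mem_takeWhile_imp hd
        · exact ih _ (by have := List.length_dropWhile_le (fun c => !PySem.Chars.isspace c) t; simp at h; omega) w hw

-- split₀ is empty iff everything is whitespace
lemma pvW2 : ∀ (n : Nat) (u : List Char), u.length ≤ n →
    (PySem.Chars.split₀ u = [] ↔ ∀ c ∈ u, PySem.Chars.isspace c = true) := by
  intro n
  induction n with
  | zero =>
    intro u h
    have : u = [] := by cases u with | nil => rfl | cons a t => simp at h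
    subst this; simp [pvSplit_nil]
  | succ n ih =>
    intro u h
    cases u with
    | nil => simp [pvSplit_nil]
    | cons c t =>
      by_cases hs : PySem.Chars.isspace c = true
      · rw [pvSplit_space t hs, ih t (by simp at h; omega)]
        simp [hs]
      · rw [pvSplit_nonspace t (by simpa using hs)]
        constructor
        · intro hh; simp at hh
        · intro hh; exact absurd (hh c (by simp)) (by simp [hs])

lemma pvLastRun_all_nonsep {p : Char → Bool} {w : List Char} (h : ∀ c ∈ w, p c = false) :
    pvLastRun p w = w := by
  unfold pvLastRun
  have h1 : w.reverse.dropWhile p = w.reverse := by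
    rw [List.dropWhile_eq_self_iff]
    intro hl
    simp only [List.getElem_reverse]
    simp only [Bool.not_eq_true]
    exact h _ (List.getElem_mem _)
  have h2 : w.reverse.takeWhile (fun c => !p c) = w.reverse := by
    rw [List.takeWhile_eq_self_iff]
    intro x hx
    simp [h _ (List.mem_reverse.mp hx)]
  rw [h1, h2, List.reverse_reverse]

lemma pvM : ∀ (n : Nat) (u : List Char), u.length ≤ n → PySem.Chars.split₀ u ≠ [] →
    (PySem.Chars.split₀ u).getLast? = some (pvLastRun PySem.Chars.isspace u) := by
  intro n
  induction n with
  | zero =>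
    intro u h hne
    have : u = [] := by cases u with | nil => rfl | cons a t => simp at h
    subst this; simp [pvSplit_nil] at hne
  | succ n ih =>
    intro u h hne
    cases u with
    | nil => simp [pvSplit_nil] at hne
    | cons c t =>
      by_cases hs : PySem.Chars.isspace c = true
      · rw [pvSplit_space t hs] at hne ⊢
        rw [ih t (by simp at h; omega) hne]
        congr 1
        have hct : c :: t = [c] ++ t := rfl
        rw [hct, pvLastRun_prefix (by simp [hs])]
      · have hs' : PySem.Chars.isspace c = false := by simpa using hs
        rw [pvSplit_nonspace t hs'] at hne ⊢
        have hu : c :: t = (c :: t.takeWhile (fun c => !PySem.Chars.isspace c)) ++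
            t.dropWhile (fun c => !PySem.Chars.isspace c) := by
          rw [List.cons_append, List.takeWhile_append_dropWhile]
        have hwns : ∀ d ∈ c :: t.takeWhile (fun c => !PySem.Chars.isspace c),
            PySem.Chars.isspace d = false := by
          intro d hd
          rw [List.mem_cons] at hd
          rcases hd with rfl | hd
          · exact hs'
          · simpa using List.mem_takeWhile_imp hd
        cases hrest : PySem.Chars.split₀ (t.dropWhile (fun c => !PySem.Chars.isspace c)) with
        | nil =>
          have hall : ∀ d ∈ t.dropWhile (fun c => !PySem.Chars.isspace c),
              PySem.Chars.isspace d = true :=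
            (pvW2 _ _ le_rfl).mp hrest
          rw [show pvLastRun PySem.Chars.isspace (c :: t) =
              (c :: t.takeWhile (fun c => !PySem.Chars.isspace c)) by
            rw [hu, pvLastRun_suffix hall, pvLastRun_all_nonsep hwns]]
          rfl
        | cons x xs =>
          rw [List.getLast?_cons_cons]
          have hblen : (t.dropWhile (fun c => !PySem.Chars.isspace c)).length ≤ n := by
            have := List.length_dropWhile_le (fun c => !PySem.Chars.isspace c) t
            simp at h; omega
          have h1 := ih _ hblen (by rw [hrest]; simp)
          rw [hrest] at h1
          rw [h1]
          congr 1
          cases hd : t.dropWhile (fun c => !PySem.Chars.isspace c) with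
          | nil => rw [hd] at hrest; simp [pvSplit_nil] at hrest
          | cons s₀ r' =>
            have h₀ : PySem.Chars.isspace s₀ = true := by
              have h1 := List.head_dropWhile_not (fun c => !PySem.Chars.isspace c) (l := t)
                (by rw [hd]; simp)
              have h2 : (t.dropWhile (fun c => !PySem.Chars.isspace c)).head
                  (by rw [hd]; simp) = s₀ := by simp [hd]
              rw [h2] at h1
              simpa using h1
            have hex : ∃ d ∈ s₀ :: r', PySem.Chars.isspace d = false := by
              by_contra hcon
              push Not at hcon
              have : PySem.Chars.split₀ (s₀ :: r') = [] :=
                (pvW2 _ _ le_rfl).mpr (by intro d hdm; simpa using hcon d hdm)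
              rw [hd] at hrest; rw [this] at hrest; simp at hrest
            rw [hu, hd, pvLastRun_append _ s₀ r' h₀ hex]

-- splitOn.go consumes a space-free word one character at a time
lemma pvSplitOnGoSkip : ∀ (w : List Char), (' ' ∉ w) →
    ∀ (fuel : Nat) (l' cur : List Char) (accs : List (List Char)),
      PySem.Chars.splitOn.go [' '] (w.length + fuel) (w ++ l') cur accs =
        PySem.Chars.splitOn.go [' '] fuel l' (w.reverse ++ cur) accs := by
  intro w
  induction w with
  | nil => intro _ fuel l' cur accs; simp
  | cons c w' ih =>
    intro hnm fuel l' cur accs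
    have hc : (' ' == c) = false := by
      simp only [beq_eq_false_iff_ne, ne_eq]
      intro h'; exact hnm (by simp [← h'])
    have hstep : (c :: w').length + fuel = (w'.length + fuel) + 1 := by simp; omega
    simp only [List.cons_append]
    rw [hstep, PySem.Chars.splitOn.go]
    simp only [List.isPrefixOf, hc, Bool.false_and, Bool.false_eq_true, if_false]
    rw [ih (fun hm => hnm (List.mem_cons_of_mem _ hm)) fuel l' (c :: cur) accs]
    simp

-- splitting the joined words recovers the word list
lemma pvSplitOnJoin : ∀ (ws : List (List Char)) (accs : List (List Char)) (fuel : Nat),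
    ws ≠ [] → (∀ w ∈ ws, ' ' ∉ w) → (PySem.Chars.join [' '] ws).length < fuel →
    PySem.Chars.splitOn.go [' '] fuel (PySem.Chars.join [' '] ws) [] accs =
      accs.reverse ++ ws := by
  intro ws
  induction ws with
  | nil => intro _ _ h; exact absurd rfl h
  | cons w t ih =>
    intro accs fuel _ hnm hfuel
    cases t with
    | nil =>
      have hj : PySem.Chars.join [' '] [w] = w := PySem.Chars.join_singleton _ _
      rw [hj] at hfuel ⊢
      obtain ⟨f1, rfl⟩ : ∃ f1, fuel = w.length + f1 := ⟨fuel - w.length, by omega⟩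
      have hskip := pvSplitOnGoSkip w (hnm w (by simp)) f1 [] [] accs
      simp only [List.append_nil] at hskip
      rw [hskip]
      rw [PySem.Chars.splitOn.go.eq_def]
      cases f1 <;> simp
    | cons b t' =>
      have hj : PySem.Chars.join [' '] (w :: b :: t') =
          w ++ [' '] ++ PySem.Chars.join [' '] (b :: t') :=
        PySem.Chars.join_cons_cons _ _ _ _
      rw [hj] at hfuel ⊢
      obtain ⟨f1, rfl⟩ : ∃ f1, fuel = w.length + f1 := ⟨fuel - w.length, by simp at hfuel; omega⟩
      rw [List.append_assoc]
      rw [pvSplitOnGoSkip w (hnm w (by simp)) f1 _ [] accs]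
      have hf1 : (PySem.Chars.join [' '] (b :: t')).length + 1 < f1 := by
        simp at hfuel; omega
      obtain ⟨f2, rfl⟩ : ∃ f2, f1 = f2 + 1 := ⟨f1 - 1, by omega⟩
      simp only [List.singleton_append]
      rw [PySem.Chars.splitOn.go]
      simp only [List.singleton_append, List.isPrefixOf, BEq.rfl, List.isPrefixOf_nil_left,
        Bool.and_true, if_true, List.length_cons, List.length_nil, List.drop_succ_cons,
        List.drop_zero, List.append_nil]
      rw [ih (w.reverse.reverse :: accs) f2 (by simp) (fun x hx => hnm x (by simp [hx])) (by omega)]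
      simp

lemma pvSp_imp_sep (c : Char) (h : PySem.Chars.isspace c = true) : pvIsSep c = true := by
  simp [pvIsSep, h]

lemma pvMem_strip (cs : List Char) (c : Char) (h : c ∈ cs) :
    PySem.Chars.isspace c = true ∨ c ∈ PySem.Chars.strip cs := by
  rw [PySem.Chars.strip]
  have h1 : PySem.Chars.isspace c = true ∨ c ∈ PySem.Chars.lstrip cs := by
    rw [PySem.Chars.lstrip]
    conv at h => rw [← List.takeWhile_append_dropWhile (p := PySem.Chars.isspace) (l := cs)]
    rcases List.mem_append.mp h with h' | h'
    · exact Or.inl (List.mem_takeWhile_imp h')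
    · exact Or.inr h'
  rcases h1 with h1 | h1
  · exact Or.inl h1
  · rw [PySem.Chars.rstrip]
    have h2 : c ∈ (PySem.Chars.lstrip cs).reverse := List.mem_reverse.mpr h1
    conv at h2 => rw [← List.takeWhile_append_dropWhile (p := PySem.Chars.isspace)
      (l := (PySem.Chars.lstrip cs).reverse)]
    rcases List.mem_append.mp h2 with h' | h'
    · exact Or.inl (List.mem_takeWhile_imp h')
    · exact Or.inr (List.mem_reverse.mpr h')

lemma pvJoin_ne_nil (ws : List (List Char)) (hne : ws ≠ []) (hw : ∀ w ∈ ws, w ≠ []) :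
    PySem.Chars.join [' '] ws ≠ [] := by
  cases ws with
  | nil => exact absurd rfl hne
  | cons w t =>
    cases t with
    | nil => rw [PySem.Chars.join_singleton]; exact hw w (by simp)
    | cons b t' =>
      rw [PySem.Chars.join_cons_cons]
      intro hc
      rcases List.append_eq_nil_iff.mp hc with ⟨h1, _⟩
      rcases List.append_eq_nil_iff.mp h1 with ⟨_, h2⟩
      simp at h2

lemma pvSplitOn_join (ws : List (List Char)) (hne : ws ≠ []) (hw : ∀ w ∈ ws, ' ' ∉ w) :
    PySem.Chars.splitOn (PySem.Chars.join [' '] ws) [' '] = ws := by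
  rw [PySem.Chars.splitOn]
  rw [pvSplitOnJoin ws [] ((PySem.Chars.join [' '] ws).length + 1) hne hw (by omega)]
  simp

lemma pvLastRun_strip (cs : List Char) :
    pvLastRun pvIsSep (PySem.Chars.strip cs) = pvLastRun pvIsSep cs := by
  rw [PySem.Chars.strip]
  have hr : ∀ w : List Char, pvLastRun pvIsSep (PySem.Chars.rstrip w) = pvLastRun pvIsSep w := by
    intro w
    unfold pvLastRun
    rw [PySem.Chars.rstrip, List.reverse_reverse,
      pvDropWhile_dropWhile (fun c h => pvSp_imp_sep c h)]
  rw [hr]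
  rw [PySem.Chars.lstrip]
  conv_rhs => rw [← List.takeWhile_append_dropWhile (p := PySem.Chars.isspace) (l := cs)]
  rw [pvLastRun_prefix (fun c hc => pvSp_imp_sep c (List.mem_takeWhile_imp hc))]

theorem pvCore_eq (cs : List Char) : pvACore cs = pvBCore cs := by
  unfold pvACore pvBCore
  have hrun : ((cs.reverse.dropWhile pvIsSep).takeWhile (fun c => !pvIsSep c)).reverse
      = pvLastRun pvIsSep cs := rfl
  have hmap : PySem.Chars.lower (PySem.Chars.strip cs) = (PySem.Chars.strip cs).map PySem.Chars.lowerChar := rfl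
  rw [hmap]
  dsimp only
  rw [pvFoldl_replace, List.map_map]
  have hF : (pvSubst ∘ PySem.Chars.lowerChar) = pvF := by funext c; rfl
  rw [hF]
  by_cases hsp : PySem.Chars.split₀ ((PySem.Chars.strip cs).map pvF) = []
  · rw [hsp]
    have hjoin : PySem.Chars.join [' '] ([] : List (List Char)) = [] := PySem.Chars.join_nil _
    rw [hjoin]
    simp only [List.isEmpty_nil, if_true]
    -- B side: everything in cs is a separator
    have hallu := (pvW2 _ _ le_rfl).mp hsp
    have hallcs : ∀ c ∈ cs, pvIsSep c = true := by
      intro c hc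
      rcases pvMem_strip cs c hc with h | h
      · exact pvSp_imp_sep c h
      · have := hallu (pvF c) (List.mem_map_of_mem h)
        rwa [pvIsspace_pvF] at this
    have hdrop : cs.reverse.dropWhile pvIsSep = [] :=
      List.dropWhile_eq_nil_iff.mpr (fun c hc => hallcs c (List.mem_reverse.mp hc))
    rw [hdrop]
    rfl
  · have hw1 := pvW1 _ ((PySem.Chars.strip cs).map pvF) le_rfl
    have hje : (PySem.Chars.join [' '] (PySem.Chars.split₀ ((PySem.Chars.strip cs).map pvF))).isEmpty = false := by
      rw [List.isEmpty_eq_false_iff]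
      exact pvJoin_ne_nil _ hsp (fun w hw => (hw1 w hw).1)
    rw [hje]
    simp only [Bool.false_eq_true, if_false]
    rw [pvSplitOn_join _ hsp (by
      intro w hw hmem
      have := (hw1 w hw).2 ' ' hmem
      simp [PySem.Chars.isspace] at this)]
    have hgl := pvM _ ((PySem.Chars.strip cs).map pvF) le_rfl hsp
    have hlast : PySem.List.pyGetD (PySem.Chars.split₀ ((PySem.Chars.strip cs).map pvF)) (-1) [] =
        pvLastRun PySem.Chars.isspace ((PySem.Chars.strip cs).map pvF) := by
      rw [PySem.List.pyGetD_neg_one _ _ hsp]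
      exact (List.getLast_eq_iff_getLast?_eq_some hsp).mpr hgl
    rw [hlast]
    have hlr : pvLastRun PySem.Chars.isspace ((PySem.Chars.strip cs).map pvF) =
        (pvLastRun pvIsSep cs).map PySem.Chars.lowerChar := by
      rw [pvLastRun_map]
      have hp : (fun c => PySem.Chars.isspace (pvF c)) = pvIsSep := by
        funext c; exact pvIsspace_pvF c
      rw [hp, pvLastRun_strip]
      apply List.map_congr_left
      intro c hc
      apply pvF_eq_lower
      have hc' : c ∈ (cs.reverse.dropWhile pvIsSep).takeWhile (fun c => !pvIsSep c) := by
        unfold pvLastRun at hc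
        exact List.mem_reverse.mp hc
      simpa using List.mem_takeWhile_imp hc'
    rw [hlr]
    have hword : PySem.Chars.lower ((cs.reverse.dropWhile pvIsSep).takeWhile (fun c => !pvIsSep c)).reverse
        = (pvLastRun pvIsSep cs).map PySem.Chars.lowerChar := by
      rw [hrun]; rfl
    rw [← hword]

-- ===== VERDICT (by name: the statement is the Claim_ definition above) =====
theorem normalize_name_for_merge_py_spec : Claim_equal_normalize_name_for_merge_py := by
  intro name _
  unfold Spec_normalize_name_for_merge_py normalize_name_for_merge_py normalize_name_for_merge_py_alt
  rw [pvCore_eq]
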